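-- pv_equiv track=rewrite | github.com/vllm-project/vllm | examples/offline_inference/glm4_5v.py | get_text_prompts
-- ===== SOURCE A (Python) =====
-- def get_text_prompts(num_prompts):
--     prompts = [
--         "Hello, my name is",
--         "The president of the United States is",
--         "The capital of France is",
--         "The future of AI is",
--     ]
--     while num_prompts > len(prompts):
--         prompts *= 2
--     return prompts[:num_prompts]
-- ===== SOURCE B (Python) =====
-- def get_text_prompts(num_prompts):
--     base = [
--         "Hello, my name is",
--         "The president of the United States is",
--         "The capital of France is",
--         "The future of AI is",
--     ]
--     return [base[i % len(base)] for i in range(num_prompts)]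
-- ===== Notes on version B (the rewrite author's own statement) =====
-- stated objective: idiomatic
-- what changed: Per-element cyclic indexing (base[i % len(base)] for each requested position) instead of A's geometric list doubling followed by a slice; no intermediate oversized list is ever built.
-- intended difference: For num_prompts strictly between -4 and 0, A returns a nonempty prefix of the base list (Python's negative slice base[:n]) while B returns the empty list, which is the intended result for a negative prompt count. — e.g. on get_text_prompts(-1): A returns ["Hello, my name is", "The president of the United States is", "The capital of France is"], B returns []
import Mathlib
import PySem

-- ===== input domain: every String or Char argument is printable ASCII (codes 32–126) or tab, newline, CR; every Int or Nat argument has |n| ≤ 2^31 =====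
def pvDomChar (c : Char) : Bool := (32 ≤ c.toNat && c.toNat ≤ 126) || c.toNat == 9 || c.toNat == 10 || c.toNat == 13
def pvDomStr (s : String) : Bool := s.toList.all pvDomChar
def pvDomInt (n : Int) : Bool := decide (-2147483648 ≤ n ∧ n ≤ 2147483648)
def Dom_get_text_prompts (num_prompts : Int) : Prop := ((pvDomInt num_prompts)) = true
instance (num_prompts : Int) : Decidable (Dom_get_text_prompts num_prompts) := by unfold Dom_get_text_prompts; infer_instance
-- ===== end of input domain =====

-- B builds each requested prompt by cyclic indexing (base[i % 4] for i in range(n)) instead of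
-- A's doubling-then-slice; objective: idiomatic. On negative num_prompts above -4 B intentionally
-- returns [] where A returns a slice artefact (see D_ below).

-- ===== PORT A =====
-- A's `while num_prompts > len(prompts): prompts *= 2` loop (the `ps ≠ []` guard is a
-- totality guard only: A always calls it with the nonempty 4-element list, and doubling
-- preserves nonemptiness, so the guard never fires on reachable states)
def pvLoopA (n : Int) (ps : List String) : List String :=
  if _h : ps ≠ [] ∧ n > ps.length then pvLoopA n (ps ++ ps) else ps
termination_by (n - ps.length).toNat
decreasing_by
  simp only [List.length_append]
  have : 0 < ps.length := List.length_pos_iff.mpr _h.1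
  omega

def get_text_prompts (num_prompts : Int) : List String :=
  let prompts := [
    "Hello, my name is",
    "The president of the United States is",
    "The capital of France is",
    "The future of AI is"]
  PySem.List.slice (pvLoopA num_prompts prompts) none (some num_prompts)

-- ===== PORT B =====
-- `[base[i % len(base)] for i in range(num_prompts)]`; every i from range is ≥ 0, so
-- i % 4 ∈ [0,4) and pyGet? always returns some — the `.getD ""` default is never reached.
def get_text_prompts_alt (num_prompts : Int) : List String :=
  let base := [
    "Hello, my name is",
    "The president of the United States is",
    "The capital of France is",
    "The future of AI is"]
  (PySem.List.pyRange 0 num_prompts 1).map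
    (fun i => (PySem.List.pyGet? base (PySem.Int.mod i (base.length : Int))).getD "")

-- ===== PRECONDITION & SPEC =====
-- For num_prompts strictly between -4 and 0, A returns a nonempty prefix of the base list
-- (Python's negative slice base[:n]) while B returns [], the intended result for a negative count.
def D_get_text_prompts (num_prompts : Int) : Prop := -4 < num_prompts ∧ num_prompts < 0
instance (num_prompts : Int) : Decidable (D_get_text_prompts num_prompts) := by unfold D_get_text_prompts; infer_instance

def Spec_get_text_prompts (num_prompts : Int) (out : List String) : Prop := ¬ D_get_text_prompts num_prompts → out = get_text_prompts_alt num_prompts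
instance (num_prompts : Int) (out : List String) : Decidable (Spec_get_text_prompts num_prompts out) := by unfold Spec_get_text_prompts; infer_instance

def pvDiffWitness_get_text_prompts : Int := -1
def pvDiffWitnessOut_get_text_prompts : (List String) × (List String) :=
  (["Hello, my name is",
    "The president of the United States is",
    "The capital of France is"], [])

-- ===== CLAIM =====
def Claim_unchanged_get_text_prompts : Prop := ∀ (num_prompts : Int), Dom_get_text_prompts num_prompts → Spec_get_text_prompts num_prompts (get_text_prompts num_prompts)
def Claim_changed_get_text_prompts : Prop := Dom_get_text_prompts (pvDiffWitness_get_text_prompts) ∧ D_get_text_prompts (pvDiffWitness_get_text_prompts) ∧ get_text_prompts (pvDiffWitness_get_text_prompts) = pvDiffWitnessOut_get_text_prompts.1 ∧ get_text_prompts_alt (pvDiffWitness_get_text_prompts) = pvDiffWitnessOut_get_text_prompts.2 ∧ pvDiffWitnessOut_get_text_prompts.1 ≠ pvDiffWitnessOut_get_text_prompts.2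
def Claim_exact_get_text_prompts : Prop := ∀ (num_prompts : Int), Dom_get_text_prompts num_prompts → D_get_text_prompts num_prompts → get_text_prompts num_prompts ≠ get_text_prompts_alt num_prompts

-- ===== LEMMAS AND PROOFS =====

def pvBase : List String := [
  "Hello, my name is",
  "The president of the United States is",
  "The capital of France is",
  "The future of AI is"]

def pvFlat (j : Nat) : List String := (List.replicate j pvBase).flatten

theorem pvFlat_length (j : Nat) : (pvFlat j).length = 4 * j := by
  induction j with
  | zero => simp [pvFlat]
  | succ j ih =>
    simp only [pvFlat, List.replicate_succ, List.flatten_cons, List.length_append] at *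
    simp [pvBase]; omega

theorem pvFlat_succ (j : Nat) : pvFlat (j + 1) = pvBase ++ pvFlat j := by
  simp only [pvFlat, List.replicate_succ, List.flatten_cons]

theorem pvFlat_ne_nil (j : Nat) (hj : 1 ≤ j) : pvFlat j ≠ [] := by
  intro h
  have := pvFlat_length j
  rw [h] at this
  simp at this
  omega

theorem pvLoopA_spec (n : Int) (j : Nat) (hj : 1 ≤ j) :
    ∃ j', j ≤ j' ∧ pvLoopA n (pvFlat j) = pvFlat j' ∧ n ≤ 4 * j' := by
  generalize hm : (n - 4 * j).toNat = m
  induction m using Nat.strong_induction_on generalizing j with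
  | _ m ih =>
    rw [pvLoopA]
    by_cases hcond : pvFlat j ≠ [] ∧ n > (pvFlat j).length
    · rw [dif_pos hcond]
      have hlen := pvFlat_length j
      have hgt : n > 4 * j := by rw [hlen] at hcond; exact_mod_cast hcond.2
      have hflat : pvFlat j ++ pvFlat j = pvFlat (j + j) := by
        simp only [pvFlat, ← List.flatten_append, ← List.replicate_add]
      rw [hflat]
      have hmeas : (n - 4 * (j + j)).toNat < m := by omega
      obtain ⟨j', h1, h2, h3⟩ := ih _ hmeas (j + j) (by omega) rfl
      exact ⟨j', by omega, h2, h3⟩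
    · rw [dif_neg hcond]
      push_neg at hcond
      have hle : n ≤ 4 * j := by
        have := hcond (pvFlat_ne_nil j hj)
        rw [pvFlat_length] at this
        exact_mod_cast this
      exact ⟨j, le_refl j, rfl, hle⟩

-- the element B computes at position j (j ≥ 0, arriving as a Nat cast)
theorem pvElem_nat (j : Nat) :
    (PySem.List.pyGet? pvBase (PySem.Int.mod ((j : Nat) : Int) ((pvBase.length : Nat) : Int))).getD "" =
      pvBase[j % 4]'(by have : j % 4 < 4 := Nat.mod_lt _ (by omega); simp [pvBase]; omega) := by
  rw [PySem.Int.mod_natCast, PySem.List.pyGet?_natCast]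
  have h : j % pvBase.length < pvBase.length := Nat.mod_lt _ (by simp [pvBase])
  rw [List.getElem?_eq_getElem h]
  rfl

theorem pvFlat_getElem (k i : Nat) (h : i < 4 * k) :
    (pvFlat k)[i]'(by rw [pvFlat_length]; exact h) =
      pvBase[i % 4]'(by have : i % 4 < 4 := Nat.mod_lt _ (by omega); simp [pvBase]; omega) := by
  induction k generalizing i with
  | zero => omega
  | succ k ih =>
    have hlenB : pvBase.length = 4 := by simp [pvBase]
    by_cases hi : i < 4
    · have : (pvFlat (k + 1))[i]'(by rw [pvFlat_length]; omega) =
          pvBase[i]'(by omega) := by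
        simp only [pvFlat_succ]
        rw [List.getElem_append_left (by omega)]
      rw [this]
      simp [Nat.mod_eq_of_lt hi]
    · have h4 : i - 4 < 4 * k := by omega
      have : (pvFlat (k + 1))[i]'(by rw [pvFlat_length]; omega) =
          (pvFlat k)[i - 4]'(by rw [pvFlat_length]; exact h4) := by
        simp only [pvFlat_succ]
        rw [List.getElem_append_right (by omega)]
        congr 1
      rw [this, ih (i - 4) h4]
      simp [show (i - 4) % 4 = i % 4 from by omega]

theorem pvMapRange_eq (m k : Nat) (h : m ≤ 4 * k) :
    List.map
        ((fun i => (PySem.List.pyGet? pvBase (PySem.Int.mod i ((pvBase.length : Nat) : Int))).getD "") ∘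
          fun j => ((j : Nat) : Int))
        (List.range m) =
      (pvFlat k).take m := by
  apply List.ext_getElem
  · simp [pvFlat_length]; omega
  · intro i h1 h2
    simp only [List.getElem_map, Function.comp_apply, List.getElem_range, List.getElem_take]
    rw [pvElem_nat, pvFlat_getElem k i (by simp [List.length_take, pvFlat_length] at h2; omega)]

theorem pvA_small (n : Int) (h : n ≤ 4) :
    get_text_prompts n = PySem.List.slice pvBase none (some n) := by
  unfold get_text_prompts
  show PySem.List.slice (pvLoopA n pvBase) none (some n) = _
  rw [pvLoopA, dif_neg]
  push_neg
  intro _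
  have : pvBase.length = 4 := by simp [pvBase]
  rw [this]
  exact_mod_cast h

-- ===== VERDICT =====
theorem get_text_prompts_spec : Claim_unchanged_get_text_prompts := by
  intro n _dom hD
  unfold D_get_text_prompts at hD
  push_neg at hD
  unfold get_text_prompts get_text_prompts_alt
  show PySem.List.slice (pvLoopA n pvBase) none (some n) =
    (PySem.List.pyRange 0 n 1).map
      (fun i => (PySem.List.pyGet? pvBase (PySem.Int.mod i (pvBase.length : Int))).getD "")
  have hlenB : pvBase.length = 4 := by simp [pvBase]
  by_cases hn : 0 ≤ n
  · -- n ≥ 0: both sides are the first n elements of the infinite cycle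
    obtain ⟨j', hj1, hres, hbound⟩ := pvLoopA_spec n 1 (le_refl 1)
    have hres' : pvLoopA n pvBase = pvFlat j' := by
      rw [show pvBase = pvFlat 1 by simp [pvFlat]]; exact hres
    rw [hres', PySem.List.slice_to _ hn]
    rw [show n = ((n.toNat : Nat) : Int) by omega, PySem.List.pyRange_zero_natCast,
        List.map_map]
    simp only [Int.toNat_natCast]
    exact (pvMapRange_eq n.toNat j' (by omega)).symm
  · -- n ≤ -4 (hD rules out -1..-3): both sides are []
    push_neg at hn
    have h4 : n ≤ -4 := by omega
    have hloop : pvLoopA n pvBase = pvBase := by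
      rw [pvLoopA, dif_neg]
      push_neg
      intro _
      rw [hlenB]
      omega
    rw [hloop, PySem.List.pyRange_one_eq_nil (by omega : n ≤ 0), List.map_nil]
    rw [show n = -(((-n).toNat : Nat) : Int) by omega,
        PySem.List.slice_to_neg_natCast pvBase _ (by omega)]
    rw [hlenB]
    simp
    omega

theorem get_text_prompts_changed : Claim_changed_get_text_prompts := by
  unfold Claim_changed_get_text_prompts pvDiffWitness_get_text_prompts
  refine ⟨by decide, by decide, ?_, by decide, by decide⟩
  rw [pvA_small (-1) (by omega)]
  decide

theorem get_text_prompts_tight : Claim_exact_get_text_prompts := by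
  intro n _dom hD
  unfold D_get_text_prompts at hD
  have h1 : n = -1 ∨ n = -2 ∨ n = -3 := by omega
  rcases h1 with h | h | h <;> subst h <;>
    rw [pvA_small _ (by omega)] <;> decide
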